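-- pv_equiv track=rewrite | github.com/nrietman/cqim-terminal-implications | engine/cqim_v14_engine.py | compute_boundary_nodes
-- ===== SOURCE A (Python) =====
-- from typing import Dict, List, Optional, Tuple, Set
--
-- def compute_boundary_nodes(clusters: List[Set[int]]) -> Dict[int, Set[int]]:
--     """For each cluster, identify nodes that appear in multiple clusters (boundary nodes)."""
--     node_count: Dict[int, int] = {}
--     for cluster in clusters:
--         for node in cluster:
--             node_count[node] = node_count.get(node, 0) + 1
--
--     boundary_per_cluster: Dict[int, Set[int]] = {}
--     for ci, cluster in enumerate(clusters):
--         boundary_per_cluster[ci] = {node for node in cluster if node_count[node] > 1}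
--
--     return boundary_per_cluster
-- ===== SOURCE B (Python) =====
-- from typing import Dict, List, Set
--
-- def compute_boundary_nodes(clusters: List[Set[int]]) -> Dict[int, Set[int]]:
--     """Boundary of cluster i = cluster_i & (union of all the OTHER clusters),
--     computed with a backward suffix-union sweep and a forward running-prefix sweep
--     (no counting of occurrences at all)."""
--     suffixes: List[Set[int]] = []
--     suffix: Set[int] = set()
--     for cluster in reversed(clusters):
--         suffixes.append(suffix)
--         suffix = suffix | cluster
--     suffixes.reverse()
--     result: Dict[int, Set[int]] = {}
--     prefix: Set[int] = set()
--     for i, (cluster, suf) in enumerate(zip(clusters, suffixes)):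
--         result[i] = cluster & (prefix | suf)
--         prefix = prefix | cluster
--     return result
-- ===== Notes on version B (the rewrite author's own statement) =====
-- stated objective: alternative
-- what changed: A counts, per node, in how many clusters it occurs and filters each cluster by count>1; B never counts: it precomputes suffix unions in a backward sweep and a running prefix union in a forward sweep, and returns each cluster intersected with the union of all OTHER clusters (prefix | suffix).
import Mathlib
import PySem

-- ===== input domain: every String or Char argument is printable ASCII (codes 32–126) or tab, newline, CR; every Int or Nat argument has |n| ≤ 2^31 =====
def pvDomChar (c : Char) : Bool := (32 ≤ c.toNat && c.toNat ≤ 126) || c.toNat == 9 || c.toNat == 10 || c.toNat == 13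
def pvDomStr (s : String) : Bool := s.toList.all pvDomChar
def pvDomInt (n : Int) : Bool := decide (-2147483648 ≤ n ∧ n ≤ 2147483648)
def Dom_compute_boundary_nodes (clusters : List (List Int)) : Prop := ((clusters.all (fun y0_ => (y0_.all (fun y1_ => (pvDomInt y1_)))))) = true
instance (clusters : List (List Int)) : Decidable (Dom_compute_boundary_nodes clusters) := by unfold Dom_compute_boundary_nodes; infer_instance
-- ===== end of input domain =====

-- B replaces A's per-node occurrence counting by a backward suffix-union sweep plus a forward
-- running-prefix sweep: boundary of cluster i = cluster_i ∩ (prefix_i ∪ suffix_i) (alternative algorithm).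


-- ===== PORT A =====
-- each Python cluster is a set: its Lean image is PySem.Set.ofList of the given list
def compute_boundary_nodes (clusters : List (List Int)) : List (Int × List Int) :=
  let node_count : PySem.Dict Int Int :=
    clusters.foldl (fun d cluster =>
      (PySem.Set.ofList cluster).foldl (fun d node => d.insert node (d.getD node 0 + 1)) d)
      PySem.Dict.empty
  let boundary_per_cluster : PySem.Dict Int (List Int) :=
    (PySem.List.enumerate clusters 0).foldl (fun d p =>
      d.insert p.1 (PySem.Set.ofList ((PySem.Set.ofList p.2).filter
        (fun node => decide (1 < node_count.getD node 0)))))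
      PySem.Dict.empty
  boundary_per_cluster.items

-- ===== PORT B =====
def compute_boundary_nodes_alt (clusters : List (List Int)) : List (Int × List Int) :=
  -- backward sweep: suffixes[i] = union of the clusters AFTER position i
  let sufAcc : List (PySem.Set Int) × PySem.Set Int :=
    clusters.reverse.foldl
      (fun st cluster => (st.1 ++ [st.2], PySem.Set.union st.2 (PySem.Set.ofList cluster)))
      ([], PySem.Set.empty)
  let suffixes : List (PySem.Set Int) := sufAcc.1.reverse
  -- forward sweep: running prefix union; result[i] = cluster_i & (prefix | suffixes[i])
  let res : PySem.Dict Int (List Int) × PySem.Set Int :=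
    (PySem.List.enumerate (clusters.zip suffixes) 0).foldl
      (fun st p =>
        (st.1.insert p.1 (PySem.Set.inter (PySem.Set.ofList p.2.1) (PySem.Set.union st.2 p.2.2)),
         PySem.Set.union st.2 (PySem.Set.ofList p.2.1)))
      (PySem.Dict.empty, PySem.Set.empty)
  res.1.items

-- ===== PRECONDITION & SPEC =====
def Spec_compute_boundary_nodes (clusters : List (List Int)) (out : List (Int × List Int)) : Prop := out = compute_boundary_nodes_alt clusters
instance (clusters : List (List Int)) (out : List (Int × List Int)) : Decidable (Spec_compute_boundary_nodes clusters out) := by unfold Spec_compute_boundary_nodes; infer_instance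

-- ===== CLAIM (what is proved, stated in full; the proofs are below) =====
def Claim_equal_compute_boundary_nodes : Prop := ∀ (clusters : List (List Int)), Dom_compute_boundary_nodes clusters → Spec_compute_boundary_nodes clusters (compute_boundary_nodes clusters)

-- ===== LEMMAS AND PROOFS =====

-- how many clusters contain n (each Python cluster is a set, so each contributes at most 1)
def pvOcc (clusters : List (List Int)) (n : Int) : Nat :=
  clusters.countP (fun cl => decide (n ∈ cl))

-- A's node_count is the number of clusters containing n
theorem pv_count_A (clusters : List (List Int)) (d : PySem.Dict Int Int) (n : Int) :
    (clusters.foldl (fun d cluster =>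
        (PySem.Set.ofList cluster).foldl (fun d node => d.insert node (d.getD node 0 + 1)) d)
      d).getD n 0 = d.getD n 0 + (pvOcc clusters n : Int) := by
  induction clusters generalizing d with
  | nil => simp [pvOcc]
  | cons c rest ih =>
    simp only [List.foldl_cons]
    rw [ih]
    rw [PySem.Dict.getD_foldl_insert_add_one]
    have hc : List.count n (PySem.Set.ofList c) = if n ∈ c then 1 else 0 := by
      by_cases h : n ∈ c
      · rw [if_pos h]
        exact List.count_eq_one_of_mem (PySem.Set.nodup_ofList c)
          ((PySem.Set.mem_ofList c n).mpr h)
      · rw [if_neg h]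
        exact List.count_eq_zero_of_not_mem
          (fun hm => h ((PySem.Set.mem_ofList c n).mp hm))
    rw [hc]
    simp only [pvOcc, List.countP_cons]
    by_cases h : n ∈ c
    · simp [h]; omega
    · simp [h]

-- the backward sweep of B (proof-side name for the fold in the port)
def pvSufAux (clusters : List (List Int)) : List (PySem.Set Int) × PySem.Set Int :=
  clusters.reverse.foldl
    (fun st cluster => (st.1 ++ [st.2], PySem.Set.union st.2 (PySem.Set.ofList cluster)))
    ([], PySem.Set.empty)

theorem pvSufAux_cons (c : List Int) (rest : List (List Int)) :
    pvSufAux (c :: rest) =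
      ((pvSufAux rest).1 ++ [(pvSufAux rest).2],
       PySem.Set.union (pvSufAux rest).2 (PySem.Set.ofList c)) := by
  unfold pvSufAux
  rw [List.reverse_cons, List.foldl_append]
  simp

theorem pvSufAux_nil : pvSufAux [] = ([], PySem.Set.empty) := rfl

theorem pvSufAux_snd_mem (clusters : List (List Int)) (x : Int) :
    x ∈ (pvSufAux clusters).2 ↔ ∃ c ∈ clusters, x ∈ c := by
  induction clusters with
  | nil => rw [pvSufAux_nil]; simp [PySem.Set.empty]
  | cons c rest ih =>
    rw [pvSufAux_cons]
    simp only [PySem.Set.mem_union, PySem.Set.mem_ofList, ih]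
    constructor
    · rintro (⟨cl, hcl, hx⟩ | hx)
      · exact ⟨cl, List.mem_cons_of_mem _ hcl, hx⟩
      · exact ⟨c, List.mem_cons_self, hx⟩
    · rintro ⟨cl, hcl, hx⟩
      rcases List.mem_cons.mp hcl with rfl | h
      · exact Or.inr hx
      · exact Or.inl ⟨cl, h, hx⟩
theorem pv_inter_def (s t : PySem.Set Int) :
    PySem.Set.inter s t = s.filter (fun x => PySem.Set.contains t x) := rfl

-- main induction, with the A-side filter predicate ABSTRACTED to keep terms small:
-- the two dict-building folds produce the SAME dict, given the processed prefix ls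
theorem pv_main (P : Int → Bool) (all cs ls : List (List Int))
    (h : all = ls ++ cs)
    (hP : ∀ x, P x = true ↔ 2 ≤ pvOcc all x)
    (d : PySem.Dict Int (List Int)) (pre : PySem.Set Int)
    (hpre : ∀ x, x ∈ pre ↔ ∃ c ∈ ls, x ∈ c) :
    (PySem.List.enumerate cs (ls.length : Int)).foldl (fun d p =>
        d.insert p.1 (PySem.Set.ofList ((PySem.Set.ofList p.2).filter P))) d
    = ((PySem.List.enumerate (cs.zip (pvSufAux cs).1.reverse) (ls.length : Int)).foldl
        (fun st p =>
          (st.1.insert p.1 (PySem.Set.inter (PySem.Set.ofList p.2.1) (PySem.Set.union st.2 p.2.2)),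
           PySem.Set.union st.2 (PySem.Set.ofList p.2.1)))
        (d, pre)).1 := by
  induction cs generalizing ls d pre with
  | nil => rfl
  | cons c cs' ih =>
    rw [pvSufAux_cons]
    have hzip : (c :: cs').zip ((pvSufAux cs').1 ++ [(pvSufAux cs').2]).reverse
        = (c, (pvSufAux cs').2) :: cs'.zip (pvSufAux cs').1.reverse := by
      rw [List.reverse_append]
      simp
    rw [hzip, PySem.List.enumerate_cons, PySem.List.enumerate_cons,
        List.foldl_cons, List.foldl_cons]
    have hval : PySem.Set.ofList ((PySem.Set.ofList c).filter P)
        = PySem.Set.inter (PySem.Set.ofList c) (PySem.Set.union pre (pvSufAux cs').2) := by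
      rw [PySem.Set.ofList_eq_self_of_nodup _ (List.Nodup.filter _ (PySem.Set.nodup_ofList c)),
          pv_inter_def]
      apply List.filter_congr
      intro x hx
      have hxc : x ∈ c := (PySem.Set.mem_ofList c x).mp hx
      have hmem1 : x ∈ pre ↔ 0 < pvOcc ls x := by
        rw [hpre x]; unfold pvOcc; rw [List.countP_pos_iff]; simp
      have hmem2 : x ∈ (pvSufAux cs').2 ↔ 0 < pvOcc cs' x := by
        rw [pvSufAux_snd_mem]; unfold pvOcc; rw [List.countP_pos_iff]; simp
      have hocc : pvOcc all x = pvOcc ls x + 1 + pvOcc cs' x := by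
        rw [h]; unfold pvOcc
        rw [List.countP_append, List.countP_cons]
        simp [hxc]
        omega
      rw [Bool.eq_iff_iff, hP x, PySem.Set.contains_iff,
          PySem.Set.mem_union, hmem1, hmem2, hocc]
      omega
    rw [hval]
    have hlen : ((ls ++ [c]).length : Int) = (ls.length : Int) + 1 := by
      simp
    have hpre' : ∀ x, x ∈ PySem.Set.union pre (PySem.Set.ofList c) ↔ ∃ cl ∈ ls ++ [c], x ∈ cl := by
      intro x
      rw [PySem.Set.mem_union, PySem.Set.mem_ofList, hpre x]
      constructor
      · rintro (⟨cl, hcl, hx⟩ | hx)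
        · exact ⟨cl, List.mem_append_left _ hcl, hx⟩
        · exact ⟨c, List.mem_append_right _ List.mem_cons_self, hx⟩
      · rintro ⟨cl, hcl, hx⟩
        rcases List.mem_append.mp hcl with h1 | h1
        · exact Or.inl ⟨cl, h1, hx⟩
        · rcases List.mem_cons.mp h1 with rfl | h2
          · exact Or.inr hx
          · cases h2
    have := ih (ls ++ [c]) (by rw [h]; simp)
      (d.insert (ls.length : Int) (PySem.Set.inter (PySem.Set.ofList c)
        (PySem.Set.union pre (pvSufAux cs').2)))
      (PySem.Set.union pre (PySem.Set.ofList c)) hpre'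
    rw [hlen] at this
    exact this

theorem compute_boundary_nodes_spec : Claim_equal_compute_boundary_nodes := by
  unfold Claim_equal_compute_boundary_nodes
  intro clusters _
  unfold Spec_compute_boundary_nodes compute_boundary_nodes compute_boundary_nodes_alt
  apply congrArg PySem.Dict.items
  apply pv_main _ clusters clusters [] rfl
  · intro x
    rw [decide_eq_true_iff, pv_count_A clusters PySem.Dict.empty x, PySem.Dict.getD_empty]
    omega
  · intro x
    simp [PySem.Set.empty]
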